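-- pv_equiv track=rewrite | github.com/SGSMarkNA/GENERAL_TOOLS | csv_utils.py | get_Last_Valid_row_for_column
-- ===== SOURCE A (Python) =====
-- def get_Last_Valid_row_for_column(csv,column):
-- 	last_valid_index  = 0
-- 	for row,rv in enumerate(csv):
-- 		try:
-- 			cell_value = rv[column]
-- 			if not cell_value == None:
-- 				last_valid_index = row
-- 		except IndexError:
-- 			pass
-- 	return last_valid_index
-- ===== SOURCE B (Python) =====
-- def get_Last_Valid_row_for_column(csv, column):
--     rows = list(csv)
--     for i in range(len(rows) - 1, -1, -1):
--         try:
--             cell = rows[i][column]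
--         except IndexError:
--             continue
--         if not cell == None:
--             return i
--     return 0
-- ===== Notes on version B (the rewrite author's own statement) =====
-- stated objective: alternative
-- what changed: B scans the rows backwards and returns the first (i.e. last) index whose cell at `column` exists and is not None, instead of A's forward pass that accumulates the last valid index; both fall back to 0.
import Mathlib
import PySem

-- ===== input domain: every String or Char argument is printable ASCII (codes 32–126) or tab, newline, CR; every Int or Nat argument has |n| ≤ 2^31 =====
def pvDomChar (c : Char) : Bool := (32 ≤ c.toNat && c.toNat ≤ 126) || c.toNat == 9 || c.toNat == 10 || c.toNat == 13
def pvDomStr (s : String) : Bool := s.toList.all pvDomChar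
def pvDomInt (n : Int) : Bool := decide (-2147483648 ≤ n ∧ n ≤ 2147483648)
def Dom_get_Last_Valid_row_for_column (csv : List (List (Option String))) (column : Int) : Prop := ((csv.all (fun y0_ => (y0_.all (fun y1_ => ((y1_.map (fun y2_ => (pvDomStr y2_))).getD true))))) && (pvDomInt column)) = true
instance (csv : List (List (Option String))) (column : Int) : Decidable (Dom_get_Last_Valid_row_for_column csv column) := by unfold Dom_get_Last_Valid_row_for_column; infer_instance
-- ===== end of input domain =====

-- B scans the rows backwards and early-returns at the last valid row instead of A's
-- accumulating forward pass (objective: alternative; same O(n) cost).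

-- ===== PORT A =====
-- forward pass over enumerate(csv), keeping the last index whose cell is not None;
-- pyGet? = rv[column] (none = IndexError → pass)
def get_Last_Valid_row_for_column (csv : List (List (Option String))) (column : Int) : Int :=
  (PySem.List.enumerate csv 0).foldl
    (fun last_valid_index p =>
      match PySem.List.pyGet? p.2 column with
      | none => last_valid_index
      | some cell_value => if cell_value ≠ none then p.1 else last_valid_index)
    0

-- ===== PORT B =====
-- backward index loop: pvAltGo csv column (i+1) inspects row index i and recurses downward;
-- rows[i] never raises inside the loop, so it is List.getD
def pvAltGo (csv : List (List (Option String))) (column : Int) : Nat → Int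
  | 0 => 0
  | i + 1 =>
    match PySem.List.pyGet? (csv.getD i []) column with
    | none => pvAltGo csv column i
    | some cell => if cell ≠ none then (i : Int) else pvAltGo csv column i

def get_Last_Valid_row_for_column_alt (csv : List (List (Option String))) (column : Int) : Int :=
  pvAltGo csv column csv.length

-- ===== PRECONDITION & SPEC =====
def Spec_get_Last_Valid_row_for_column (csv : List (List (Option String))) (column : Int) (out : Int) : Prop := out = get_Last_Valid_row_for_column_alt csv column
instance (csv : List (List (Option String))) (column : Int) (out : Int) : Decidable (Spec_get_Last_Valid_row_for_column csv column out) := by unfold Spec_get_Last_Valid_row_for_column; infer_instance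

-- ===== CLAIM (what is proved, stated in full; the proofs are below) =====
def Claim_equal_get_Last_Valid_row_for_column : Prop := ∀ (csv : List (List (Option String))) (column : Int), Dom_get_Last_Valid_row_for_column csv column → Spec_get_Last_Valid_row_for_column csv column (get_Last_Valid_row_for_column csv column)

-- ===== LEMMAS AND PROOFS =====

theorem pvEnumerate_append_singleton (l : List (List (Option String))) (x : List (Option String)) :
    ∀ s : Int, PySem.List.enumerate (l ++ [x]) s = PySem.List.enumerate l s ++ [(s + l.length, x)] := by
  induction l with
  | nil => intro s; simp [PySem.List.enumerate_nil, PySem.List.enumerate_cons]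
  | cons h t ih =>
      intro s
      simp only [List.cons_append, PySem.List.enumerate_cons, ih (s + 1), List.length_cons]
      push_cast
      ring_nf

theorem pvAltGo_append (l : List (List (Option String))) (x : List (Option String)) (column : Int) :
    ∀ i : Nat, i ≤ l.length → pvAltGo (l ++ [x]) column i = pvAltGo l column i := by
  intro i
  induction i with
  | zero => intro _; rfl
  | succ k ih =>
      intro hk
      have hlt : k < l.length := by omega
      have hget : (l ++ [x]).getD k [] = l.getD k [] := by
        simp [List.getD, List.getElem?_append_left hlt]
      simp only [pvAltGo, hget, ih (by omega)]

theorem pvAltGo_snoc (l : List (List (Option String))) (x : List (Option String)) (column : Int) :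
    get_Last_Valid_row_for_column_alt (l ++ [x]) column =
      (match PySem.List.pyGet? x column with
       | none => get_Last_Valid_row_for_column_alt l column
       | some cell => if cell ≠ none then (l.length : Int) else get_Last_Valid_row_for_column_alt l column) := by
  have hx : (l ++ [x]).getD l.length [] = x := by
    simp [List.getD]
  simp only [get_Last_Valid_row_for_column_alt, List.length_append, List.length_cons,
    List.length_nil, pvAltGo, hx, pvAltGo_append l x column l.length (Nat.le_refl _)]

theorem pvMain (csv : List (List (Option String))) (column : Int) :
    get_Last_Valid_row_for_column csv column = get_Last_Valid_row_for_column_alt csv column := by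
  induction csv using List.reverseRecOn with
  | nil => rfl
  | append_singleton l x ih =>
      rw [pvAltGo_snoc]
      simp only [get_Last_Valid_row_for_column, pvEnumerate_append_singleton l x 0,
        List.foldl_append, List.foldl_cons, List.foldl_nil, Int.zero_add] at *
      cases hc : PySem.List.pyGet? x column with
      | none => simpa [hc] using ih
      | some cell =>
          by_cases hn : cell = none
          · simpa [hn] using ih
          · simp [hn]

-- ===== VERDICT (by name: the statement is the Claim_ definition above) =====
theorem get_Last_Valid_row_for_column_spec : Claim_equal_get_Last_Valid_row_for_column := by
  intro csv column _
  exact pvMain csv column
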